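-- pv_equiv track=rewrite | github.com/ngi-nix/libresoc-soc | src/soc/decoder/pseudo/lexer.py | annoying_case_hack_filter
-- ===== SOURCE A (Python) =====
-- def count_spaces(l):
--     for i in range(len(l)):
--         if l[i] != ' ':
--             return i
--     return 0
--
-- def annoying_case_hack_filter(code):
--     """add annoying "silent keyword" (fallthrough)
--
--     this which tricks the parser into taking the (silent) case statement
--     as a "small expression".  it can then be spotted and used to indicate
--     "fall through" to the next case (in the parser)
--
--     also skips blank lines
--
--     bugs: any function that starts with the letters "case" or "default"
--     will be detected erroneously.  fixing that involves doing a token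
--     lexer which spots the fact that "case" and "default" are words,
--     separating them from space, colon, bracket etc.
--
--     http://bugs.libre-riscv.org/show_bug.cgi?id=280
--     """
--     res = []
--     prev_spc_count = None
--     for l in code.split("\n"):
--         spc_count = count_spaces(l)
--         nwhite = l[spc_count:]
--         if len(nwhite) == 0:  # skip blank lines
--             continue
--         if nwhite.startswith("case") or nwhite.startswith("default"):
--             #print ("case/default", nwhite, spc_count, prev_spc_count)
--             if (prev_spc_count is not None and
--                 prev_spc_count == spc_count and
--                     (res[-1].endswith(":") or res[-1].endswith(": fallthrough"))):
--                 res[-1] += " fallthrough"  # add to previous line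
--             prev_spc_count = spc_count
--         else:
--             #print ("notstarts", spc_count, nwhite)
--             prev_spc_count = None
--         res.append(l)
--     return '\n'.join(res)
-- ===== SOURCE B (Python) =====
-- def count_spaces(l):
--     for i in range(len(l)):
--         if l[i] != ' ':
--             return i
--     return 0
--
-- def _fall(p, c):
--     sp, sc = count_spaces(p), count_spaces(c)
--     hp, hc = p[sp:], c[sc:]
--     return ((hc.startswith("case") or hc.startswith("default")) and
--             (hp.startswith("case") or hp.startswith("default")) and
--             sp == sc and (p.endswith(":") or p.endswith(": fallthrough")))
--
-- def annoying_case_hack_filter(code):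
--     res = [l for l in code.split("\n") if l[count_spaces(l):]]
--     out = [p + " fallthrough" if _fall(p, c) else p
--            for p, c in zip(res, res[1:])]
--     if res:
--         out.append(res[-1])
--     return "\n".join(out)
-- ===== Notes on version B (the rewrite author's own statement) =====
-- stated objective: alternative
-- what changed: Replaces A's single pass with its prev_spc_count state machine and in-loop mutation of the last result line by a two-phase decomposition: a pure filter dropping blank lines, then a pairwise zip scan over adjacent kept lines that decides per pair whether the earlier line gets the fallthrough keyword appended.
import Mathlib
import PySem

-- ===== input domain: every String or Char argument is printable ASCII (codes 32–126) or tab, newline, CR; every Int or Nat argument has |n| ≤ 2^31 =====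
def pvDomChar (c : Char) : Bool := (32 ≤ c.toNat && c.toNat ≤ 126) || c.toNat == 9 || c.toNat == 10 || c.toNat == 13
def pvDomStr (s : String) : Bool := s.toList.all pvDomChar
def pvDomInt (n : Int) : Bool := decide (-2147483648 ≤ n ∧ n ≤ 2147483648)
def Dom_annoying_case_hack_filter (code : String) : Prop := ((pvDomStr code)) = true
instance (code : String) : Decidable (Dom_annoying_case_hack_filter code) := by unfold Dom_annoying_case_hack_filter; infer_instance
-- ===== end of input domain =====

-- B replaces A's inline prev_spc_count state machine by a blank-line filter followed by a
-- pairwise zip scan; same return value on every input (objective: alternative decomposition).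

-- ===== PORT A =====
-- count_spaces: the Python loop 'for i in range(len(l)): if l[i] != " ": return i; return 0',
-- transliterated as a recursion carrying the index i.
def count_spaces_go : List Char → Nat → Nat
  | [], _ => 0
  | c :: rest, i => if c ≠ ' ' then i else count_spaces_go rest (i + 1)

def count_spaces (l : List Char) : Nat := count_spaces_go l 0

-- one iteration of A's loop body; state = (res, prev_spc_count).
-- l[spc:] with 0 ≤ spc is List.drop (exact for Python's nonnegative slice);
-- res[-1] is getLast?, 'res[-1] += …' is dropLast ++ [last ++ …].
def stepA (st : List (List Char) × Option Nat) (l : List Char) : List (List Char) × Option Nat :=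
  let spc := count_spaces l
  let nwhite := l.drop spc
  if nwhite.length = 0 then st  -- skip blank lines
  else
    let res := st.1
    if PySem.Chars.startswith nwhite "case".toList || PySem.Chars.startswith nwhite "default".toList then
      let res' :=
        match st.2 with
        | some p =>
          match res.getLast? with  -- res[-1] (evaluated only when prev_spc_count is not None)
          | some last =>
            if p == spc && (PySem.Chars.endswith last ":".toList ||
                            PySem.Chars.endswith last ": fallthrough".toList) then
              res.dropLast ++ [last ++ " fallthrough".toList]
            else res
          | none => res
        | none => res
      (res' ++ [l], some spc)
    else (res ++ [l], none)

def annoying_case_hack_filter (code : String) : String :=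
  String.ofList (PySem.Chars.join "\n".toList
    (((PySem.Chars.splitOn code.toList "\n".toList).foldl stepA ([], none)).1))

-- ===== PORT B =====
-- the comprehension's filter: 'if l[count_spaces(l):]' (non-blank line)
def nonblankB (l : List Char) : Bool := l.drop (count_spaces l) != []

-- _fall(p, c): should ' fallthrough' be appended to p because c follows it?
def fallB (p c : List Char) : Bool :=
  let sp := count_spaces p
  let sc := count_spaces c
  let hp := p.drop sp
  let hc := c.drop sc
  (PySem.Chars.startswith hc "case".toList || PySem.Chars.startswith hc "default".toList) &&
  (PySem.Chars.startswith hp "case".toList || PySem.Chars.startswith hp "default".toList) &&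
  (sp == sc) &&
  (PySem.Chars.endswith p ":".toList || PySem.Chars.endswith p ": fallthrough".toList)

-- the zip comprehension over (res, res[1:]) plus 'out.append(res[-1]) if res'
def scanB (res : List (List Char)) : List (List Char) :=
  (res.zip res.tail).map
      (fun pc => if fallB pc.1 pc.2 then pc.1 ++ " fallthrough".toList else pc.1)
    ++ (match res.getLast? with
        | some last => [last]
        | none => [])

def annoying_case_hack_filter_alt (code : String) : String :=
  String.ofList (PySem.Chars.join "\n".toList
    (scanB ((PySem.Chars.splitOn code.toList "\n".toList).filter nonblankB)))

-- ===== PRECONDITION & SPEC =====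
def Spec_annoying_case_hack_filter (code : String) (out : String) : Prop := out = annoying_case_hack_filter_alt code
instance (code : String) (out : String) : Decidable (Spec_annoying_case_hack_filter code out) := by unfold Spec_annoying_case_hack_filter; infer_instance

-- ===== CLAIM (what is proved, stated in full; the proofs are below) =====
def Claim_equal_annoying_case_hack_filter : Prop := ∀ (code : String), Dom_annoying_case_hack_filter code → Spec_annoying_case_hack_filter code (annoying_case_hack_filter code)

-- ===== LEMMAS AND PROOFS =====

-- prev_spc_count after A processes a kept (non-blank) line l
def prevOf (l : List Char) : Option Nat :=
  if PySem.Chars.startswith (l.drop (count_spaces l)) "case".toList ||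
     PySem.Chars.startswith (l.drop (count_spaces l)) "default".toList
  then some (count_spaces l) else none

theorem stepA_blank (st : List (List Char) × Option Nat) (l : List Char)
    (h : nonblankB l = false) : stepA st l = st := by
  have h' : (l.drop (count_spaces l)).length = 0 := by
    simp only [nonblankB, bne_eq_false_iff_eq] at h
    simp [h]
  simp [stepA, h']

theorem stepA_kept (acc : List (List Char)) (l c : List Char)
    (hc : nonblankB c = true) :
    stepA (acc ++ [l], prevOf l) c
      = ((acc ++ [if fallB l c then l ++ " fallthrough".toList else l]) ++ [c], prevOf c) := by
  have hc' : c.drop (count_spaces c) ≠ [] := by simpa [nonblankB] using hc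
  have hlen : ¬ (c.drop (count_spaces c)).length = 0 :=
    fun h0 => hc' (List.length_eq_zero_iff.mp h0)
  unfold stepA prevOf fallB
  simp only [if_neg hlen]
  by_cases hsc : (PySem.Chars.startswith (c.drop (count_spaces c)) "case".toList ||
      PySem.Chars.startswith (c.drop (count_spaces c)) "default".toList) = true
  · rw [if_pos (by simpa using hsc)]
    simp only [hsc, Bool.true_and]
    by_cases hsl : (PySem.Chars.startswith (l.drop (count_spaces l)) "case".toList ||
        PySem.Chars.startswith (l.drop (count_spaces l)) "default".toList) = true
    · rw [if_pos (by simpa using hsl)]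
      simp only [hsl, Bool.true_and, List.getLast?_append, List.getLast?_singleton,
        Option.some_or]
      rw [List.dropLast_concat]
      split_ifs <;> simp
    · have hf : (PySem.Chars.startswith (l.drop (count_spaces l)) "case".toList ||
          PySem.Chars.startswith (l.drop (count_spaces l)) "default".toList) = false := by
        simpa using hsl
      rw [if_neg (by simpa using hsl)]
      simp only [Bool.or_eq_false_iff] at hf
      simp at hf
      simp [hf.1, hf.2]
  · have hf : (PySem.Chars.startswith (c.drop (count_spaces c)) "case".toList ||
        PySem.Chars.startswith (c.drop (count_spaces c)) "default".toList) = false := by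
      simpa using hsc
    rw [if_neg (by simpa using hsc)]
    simp only [Bool.or_eq_false_iff] at hf
    simp at hf
    simp [hf.1, hf.2]

theorem foldl_stepA_eq (rest : List (List Char)) :
    ∀ (l : List Char) (acc : List (List Char)),
    (∀ c ∈ rest, nonblankB c = true) →
    (rest.foldl stepA (acc ++ [l], prevOf l)).1
      = acc ++ ((l :: rest).zip rest).map
          (fun pc => if fallB pc.1 pc.2 then pc.1 ++ " fallthrough".toList else pc.1)
        ++ [(l :: rest).getLast (by simp)] := by
  induction rest with
  | nil => intro l acc _; simp
  | cons c rs ih =>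
    intro l acc hkept
    have hc : nonblankB c = true := hkept c (by simp)
    have hrs : ∀ x ∈ rs, nonblankB x = true := fun x hx => hkept x (by simp [hx])
    simp only [List.foldl_cons, stepA_kept acc l c hc]
    rw [ih c (acc ++ [if fallB l c then l ++ " fallthrough".toList else l]) hrs]
    simp [List.getLast_cons]

theorem foldl_stepA_filter (lines : List (List Char)) :
    ∀ st, lines.foldl stepA st = (lines.filter nonblankB).foldl stepA st := by
  induction lines with
  | nil => intro st; rfl
  | cons l ls ih =>
    intro st
    by_cases h : nonblankB l = true
    · rw [List.filter_cons_of_pos h]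
      simp only [List.foldl_cons, ih]
    · have hf : nonblankB l = false := by simpa using h
      rw [List.filter_cons_of_neg (by simp [hf])]
      simp only [List.foldl_cons, stepA_blank st l hf, ih]

theorem core_eq (lines : List (List Char)) :
    (lines.foldl stepA ([], none)).1 = scanB (lines.filter nonblankB) := by
  rw [foldl_stepA_filter]
  generalize hres : lines.filter nonblankB = res
  have hkept : ∀ c ∈ res, nonblankB c = true := by
    intro c hcmem
    rw [← hres] at hcmem
    exact List.of_mem_filter hcmem
  match res with
  | [] => simp [scanB]
  | l :: rest =>
    have hl : nonblankB l = true := hkept l (by simp)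
    have hrest : ∀ c ∈ rest, nonblankB c = true := fun c hcm => hkept c (by simp [hcm])
    have hl' : l.drop (count_spaces l) ≠ [] := by simpa [nonblankB] using hl
    have hlen : ¬ (l.drop (count_spaces l)).length = 0 :=
      fun h0 => hl' (List.length_eq_zero_iff.mp h0)
    have hfirst : stepA ([], none) l = ([] ++ [l], prevOf l) := by
      unfold stepA prevOf
      simp only [if_neg hlen]
      split_ifs <;> rfl
    simp only [List.foldl_cons, hfirst]
    rw [foldl_stepA_eq rest l [] hrest]
    simp [scanB, List.getLast?_eq_some_getLast]

-- ===== VERDICT (by name: the statement is the Claim_ definition above) =====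
theorem annoying_case_hack_filter_spec : Claim_equal_annoying_case_hack_filter := by
  intro code _
  unfold Spec_annoying_case_hack_filter annoying_case_hack_filter annoying_case_hack_filter_alt
  rw [core_eq]
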